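-- pv_equiv track=rewrite | github.com/jlgw/aoc2024 | day15/task2.py | to_move
-- ===== SOURCE A (Python) =====
-- right = (1, 0)
--
-- left = (-1, 0)
--
-- def add_tuple(a, b):
--     return (a[0] + b[0], a[1] + b[1])
--
-- def to_move(pos, boxes, walls, direction, width=2):
--     to_move_boxes = []
--     new_pos = add_tuple(pos, direction)
--     new_pos_left = add_tuple(new_pos, left)
--     new_pos_right = add_tuple(new_pos, right)
--     if new_pos in walls or (width == 2 and new_pos_right in walls):
--         return None
--     if new_pos in boxes:
--         to_move_boxes.append(new_pos)
--         new_boxes = boxes.copy()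
--         new_boxes.remove(new_pos)
--         move = to_move(new_pos, new_boxes, walls, direction)
--         if move is None:
--             return None
--         to_move_boxes += move
--     if new_pos_left in boxes:
--         to_move_boxes.append(new_pos_left)
--         new_boxes = boxes.copy()
--         new_boxes.remove(new_pos_left)
--         move = to_move(new_pos_left, new_boxes, walls, direction)
--         if move is None:
--             return None
--         to_move_boxes += move
--     if width == 2 and new_pos_right in boxes:
--         to_move_boxes.append(new_pos_right)
--         new_boxes = boxes.copy()
--         new_boxes.remove(new_pos_right)
--         move = to_move(new_pos_right, new_boxes, walls, direction)
--         if move is None: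
--             return None
--         to_move_boxes += move
--     return to_move_boxes
-- ===== SOURCE B (Python) =====
-- # B: iterative worklist instead of A's recursion — an explicit stack of frames
-- # (pending candidate cells + the box to restore on frame exit) drives a pre-order
-- # traversal over ONE shared live-box set, so no per-call set copy is made.
--
-- right = (1, 0)
--
-- left = (-1, 0)
--
-- def to_move(pos, boxes, walls, direction, width=2):
--     dx, dy = direction[0], direction[1]
--     live = set(boxes)
--
--     def entry(p, w):
--         # cells a box at p (pushed with width w) runs into; None if a wall blocks
--         x, y = p[0] + dx, p[1] + dy
--         if (x, y) in walls or (w == 2 and (x + 1, y) in walls):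
--             return None
--         if w == 2:
--             return [(x, y), (x - 1, y), (x + 1, y)]
--         return [(x, y), (x - 1, y)]
--
--     first = entry(pos, width)
--     if first is None:
--         return None
--     out = []
--     stack = [(first, None)]  # (pending candidates, box to re-add when frame ends)
--     while stack:
--         cands, restore = stack[-1]
--         if not cands:
--             stack.pop()
--             if restore is not None:
--                 live.add(restore)
--             continue
--         q = cands[0]
--         stack[-1] = (cands[1:], restore)
--         if q in live:
--             sub = entry(q, 2)
--             if sub is None:
--                 return None
--             out.append(q)
--             live.remove(q)
--             stack.append((sub, q))
--     return out
-- ===== Notes on version B (the rewrite author's own statement) =====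
-- stated objective: alternative
-- what changed: B replaces A's recursion (which copies the whole box set at every call) by an iterative explicit-stack worklist doing a pre-order traversal over one shared live-box set, removing a box when its frame is pushed and re-adding it when the frame is popped.
import Mathlib
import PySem

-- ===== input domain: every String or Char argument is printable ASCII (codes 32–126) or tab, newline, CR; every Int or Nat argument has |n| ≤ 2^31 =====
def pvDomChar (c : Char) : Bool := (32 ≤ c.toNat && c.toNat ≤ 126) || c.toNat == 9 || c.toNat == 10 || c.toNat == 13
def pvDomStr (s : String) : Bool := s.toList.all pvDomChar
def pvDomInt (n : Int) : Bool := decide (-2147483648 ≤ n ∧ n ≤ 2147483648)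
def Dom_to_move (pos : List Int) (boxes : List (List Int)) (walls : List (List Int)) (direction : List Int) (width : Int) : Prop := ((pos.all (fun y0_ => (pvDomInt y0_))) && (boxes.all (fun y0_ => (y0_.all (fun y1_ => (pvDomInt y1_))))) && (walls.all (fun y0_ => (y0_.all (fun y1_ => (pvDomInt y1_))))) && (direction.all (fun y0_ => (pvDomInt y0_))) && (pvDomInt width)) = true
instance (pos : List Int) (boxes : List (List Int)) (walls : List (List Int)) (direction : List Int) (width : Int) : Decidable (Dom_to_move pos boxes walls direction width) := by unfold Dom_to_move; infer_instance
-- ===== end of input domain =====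

-- B replaces A's recursion (one whole-set copy per call) by an iterative
-- explicit-stack worklist over one shared live-box set; return value proved
-- identical on Pre_.

-- termination helper, cited by port A's decreasing_by
theorem pvEraseLenLt {α : Type} [BEq α] [LawfulBEq α] {a : α} {l : List α} (h : a ∈ l) :
    (l.erase a).length < l.length := by
  have := List.length_erase_add_one h
  omega

-- ===== PORT A =====
-- Python tuples (x, y) are 2-element lists; a[0]/a[1] are exact under Pre_
-- (2 ≤ length), which excludes the IndexError inputs, so pyGetD's default is never hit.
def add_tuple (a b : List Int) : List Int :=
  [PySem.List.pyGetD a 0 0 + PySem.List.pyGetD b 0 0,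
   PySem.List.pyGetD a 1 0 + PySem.List.pyGetD b 1 0]

-- boxes/walls are Python sets of tuples; `boxes.copy(); new_boxes.remove(new_pos)`
-- under the membership test just checked is `boxes.erase new_pos`.
def to_move (pos : List Int) (boxes : List (List Int)) (walls : List (List Int)) (direction : List Int) (width : Int) : Option (List (List Int)) :=
  let new_pos := add_tuple pos direction
  let new_pos_left := add_tuple new_pos [-1, 0]
  let new_pos_right := add_tuple new_pos [1, 0]
  if new_pos ∈ walls ∨ (width = 2 ∧ new_pos_right ∈ walls) then none
  else
    let step1 : Option (List (List Int)) :=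
      if h1 : new_pos ∈ boxes then
        match to_move new_pos (boxes.erase new_pos) walls direction 2 with
        | none => none
        | some move => some (new_pos :: move)
      else some []
    match step1 with
    | none => none
    | some acc1 =>
      let step2 : Option (List (List Int)) :=
        if h2 : new_pos_left ∈ boxes then
          match to_move new_pos_left (boxes.erase new_pos_left) walls direction 2 with
          | none => none
          | some move => some (acc1 ++ new_pos_left :: move)
        else some acc1
      match step2 with
      | none => none
      | some acc2 =>
        if h3 : width = 2 ∧ new_pos_right ∈ boxes then
          match to_move new_pos_right (boxes.erase new_pos_right) walls direction 2 with
          | none => none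
          | some move => some (acc2 ++ new_pos_right :: move)
        else some acc2
termination_by boxes.length
decreasing_by
  · exact pvEraseLenLt h1
  · exact pvEraseLenLt h2
  · exact pvEraseLenLt h3.2

-- ===== PORT B =====
-- termination machinery for the worklist loop (cited by decreasing_by): an
-- exponential per-candidate weight, summed over the stack at the live-set size
-- each frame will see when it resumes.
def pvT : Nat → Nat
  | 0 => 2
  | m + 1 => 3 * pvT m + 2

def pvMeasGo : List (List (List Int) × Option (List Int)) → Nat → Nat
  | [], _ => 0
  | (cands, rb) :: rest, m =>
      cands.length * pvT m + 1 + pvMeasGo rest (m + (if rb.isSome then 1 else 0))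

theorem pvT_pos (m : Nat) : 1 ≤ pvT m := by
  cases m <;> simp [pvT]

theorem pvT_mono {m m' : Nat} (h : m ≤ m') : pvT m ≤ pvT m' := by
  induction h with
  | refl => exact le_rfl
  | step _ ih => rename_i k _; have := pvT_pos k; calc pvT m ≤ pvT k := ih
                 _ ≤ 3 * pvT k + 2 := by omega
                 _ = pvT (k + 1) := rfl

theorem pvMeasGo_mono (st : List (List (List Int) × Option (List Int))) :
    ∀ {m m' : Nat}, m ≤ m' → pvMeasGo st m ≤ pvMeasGo st m' := by
  induction st with
  | nil => intro m m' _; simp [pvMeasGo]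
  | cons fr rest ih =>
    intro m m' h
    obtain ⟨cands, rb⟩ := fr
    simp only [pvMeasGo]
    have h1 : cands.length * pvT m ≤ cands.length * pvT m' :=
      Nat.mul_le_mul_left _ (pvT_mono h)
    have h2 := ih (m := m + (if rb.isSome then 1 else 0)) (m' := m' + (if rb.isSome then 1 else 0)) (by omega)
    omega

theorem pvDiscardLenLt {q : List Int} {live : List (List Int)} (h : q ∈ live) :
    (PySem.Set.discard live q).length < live.length := by
  simp only [PySem.Set.discard]
  apply List.length_filter_lt_length_iff_exists.mpr
  exact ⟨q, h, by simp⟩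

theorem pvAddLenLe (s : List (List Int)) (x : List Int) :
    (PySem.Set.add s x).length ≤ s.length + 1 := by
  simp only [PySem.Set.add]
  split <;> simp

-- the `while stack:` loop; a frame is (pending candidate cells, box to re-add
-- to `live` when the frame is exhausted); `out` is the collected pre-order list.
def tmB_machine (walls : List (List Int)) (direction : List Int) (stack : List (List (List Int) × Option (List Int))) (live : List (List Int)) (out : List (List Int)) : Option (List (List Int)) :=
  match stack with
  | [] => some out
  | (cands, rb) :: rest =>
    match cands with
    | [] =>
        tmB_machine walls direction rest
          (match rb with | none => live | some b => PySem.Set.add live b) out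
    | q :: qs =>
      if hq : q ∈ live then
        -- entry(q, 2): the cells the box at q runs into, None if wall-blocked
        let x := PySem.List.pyGetD q 0 0 + PySem.List.pyGetD direction 0 0
        let y := PySem.List.pyGetD q 1 0 + PySem.List.pyGetD direction 1 0
        if [x, y] ∈ walls ∨ [x + 1, y] ∈ walls then none
        else
          tmB_machine walls direction
            (([[x, y], [x - 1, y], [x + 1, y]], some q) :: (qs, rb) :: rest)
            (PySem.Set.discard live q) (out ++ [q])
      else tmB_machine walls direction ((qs, rb) :: rest) live out
termination_by pvMeasGo stack live.length
decreasing_by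
  · cases rb with
    | none =>
        have hp := pvT_pos live.length
        simp [pvMeasGo]
    | some b =>
        have h1 := pvAddLenLe live b
        have h2 := pvMeasGo_mono rest (m := (PySem.Set.add live b).length)
          (m' := live.length + 1) h1
        simp [pvMeasGo]
        omega
  · -- push: one candidate at level m traded for 3 candidates at a level < m
    have hm : (PySem.Set.discard live q).length < live.length := pvDiscardLenLt hq
    have hq1 : (PySem.Set.discard live q).length + 1 ≤ live.length := by omega
    have hTm : pvT ((PySem.Set.discard live q).length + 1) ≤ pvT live.length := pvT_mono hq1
    have hTstep : 3 * pvT (PySem.Set.discard live q).length + 2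
        = pvT ((PySem.Set.discard live q).length + 1) := rfl
    have hmul : qs.length * pvT ((PySem.Set.discard live q).length + 1)
        ≤ qs.length * pvT live.length := Nat.mul_le_mul_left _ hTm
    have hs : (qs.length + 1) * pvT live.length
        = qs.length * pvT live.length + pvT live.length := Nat.succ_mul _ _
    cases rb with
    | none =>
        have hrest := pvMeasGo_mono rest
          (m := (PySem.Set.discard live q).length + 1) (m' := live.length) hq1
        simp [pvMeasGo]
        omega
    | some b =>
        have hrest := pvMeasGo_mono rest
          (m := (PySem.Set.discard live q).length + 1 + 1) (m' := live.length + 1) (by omega)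
        simp [pvMeasGo]
        omega
  · -- skipped candidate
    have hp := pvT_pos live.length
    have hs : (qs.length + 1) * pvT live.length
        = qs.length * pvT live.length + pvT live.length := Nat.succ_mul _ _
    simp [pvMeasGo]
    omega

def to_move_alt (pos : List Int) (boxes : List (List Int)) (walls : List (List Int)) (direction : List Int) (width : Int) : Option (List (List Int)) :=
  -- entry(pos, width), then the explicit-stack loop over live = set(boxes)
  let x := PySem.List.pyGetD pos 0 0 + PySem.List.pyGetD direction 0 0
  let y := PySem.List.pyGetD pos 1 0 + PySem.List.pyGetD direction 1 0
  if [x, y] ∈ walls ∨ (width = 2 ∧ [x + 1, y] ∈ walls) then none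
  else
    tmB_machine walls direction
      [((if width = 2 then [[x, y], [x - 1, y], [x + 1, y]] else [[x, y], [x - 1, y]]), none)]
      (PySem.Set.ofList boxes) []

-- ===== PRECONDITION & SPEC =====
-- Pre_ excludes (a) pos/direction with fewer than 2 coordinates, where Python A raises
-- IndexError, and (b) duplicate entries in boxes, which cannot occur since boxes is a
-- Python set (the List (List Int) encodes its distinct elements).
def Pre_to_move (pos : List Int) (boxes : List (List Int)) (walls : List (List Int)) (direction : List Int) (width : Int) : Prop :=
  2 ≤ pos.length ∧ 2 ≤ direction.length ∧ boxes.Nodup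
instance (pos : List Int) (boxes : List (List Int)) (walls : List (List Int)) (direction : List Int) (width : Int) : Decidable (Pre_to_move pos boxes walls direction width) := by unfold Pre_to_move; infer_instance

def pvWitness_to_move : List Int × List (List Int) × List (List Int) × List Int × Int :=
  ([0, 0], [[1, 0], [2, 0]], [[4, 0]], [1, 0], 2)

def Spec_to_move (pos : List Int) (boxes : List (List Int)) (walls : List (List Int)) (direction : List Int) (width : Int) (out : Option (List (List Int))) : Prop := out = to_move_alt pos boxes walls direction width
instance (pos : List Int) (boxes : List (List Int)) (walls : List (List Int)) (direction : List Int) (width : Int) (out : Option (List (List Int))) : Decidable (Spec_to_move pos boxes walls direction width out) := by unfold Spec_to_move; infer_instance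

-- ===== CLAIM (what is proved, stated in full; the proofs are below) =====
def Claim_equal_to_move : Prop := ∀ (pos : List Int) (boxes : List (List Int)) (walls : List (List Int)) (direction : List Int) (width : Int), Dom_to_move pos boxes walls direction width → Pre_to_move pos boxes walls direction width → Spec_to_move pos boxes walls direction width (to_move pos boxes walls direction width)

-- ===== LEMMAS AND PROOFS =====

theorem pvGet1 (a b d : Int) : PySem.List.pyGetD [a, b] 1 d = b := rfl

-- Python's set.discard on a duplicate-free list is List.erase
theorem pvDiscardEqErase {α : Type} [BEq α] [LawfulBEq α] (l : List α) (hl : l.Nodup) (a : α) :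
    PySem.Set.discard l a = l.erase a := by
  induction l with
  | nil => rfl
  | cons b t ih =>
    have hbt := List.nodup_cons.mp hl
    by_cases hba : b = a
    · subst hba
      have hall : ∀ y ∈ t, (!(y == b)) = true := by
        intro y hy
        simp only [Bool.not_eq_eq_eq_not, Bool.not_true, beq_eq_false_iff_ne]
        exact fun h => hbt.1 (h ▸ hy)
      rw [List.erase_cons_head]
      simp only [PySem.Set.discard]
      rw [List.filter_cons_of_neg (by simp)]
      exact List.filter_eq_self.mpr hall
    · have hcons : PySem.Set.discard (b :: t) a = b :: PySem.Set.discard t a := by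
        simp only [PySem.Set.discard]
        rw [List.filter_cons_of_pos (by simp [hba])]
      rw [hcons, ih hbt.2, List.erase_cons_tail (by simp [hba])]

-- A's three sequential push branches, as a fold over the candidate list (proof-only view)
def pvAStep (walls : List (List Int)) (direction : List Int) (boxes : List (List Int)) (cands : List (List Int)) (acc : List (List Int)) : Option (List (List Int)) :=
  match cands with
  | [] => some acc
  | q :: rest =>
    if q ∈ boxes then
      match to_move q (boxes.erase q) walls direction 2 with
      | none => none
      | some mv => pvAStep walls direction boxes rest (acc ++ q :: mv)
    else pvAStep walls direction boxes rest acc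

theorem to_move_as_step (pos : List Int) (boxes walls : List (List Int)) (direction : List Int) (w : Int) :
    to_move pos boxes walls direction w =
      if add_tuple pos direction ∈ walls ∨ (w = 2 ∧ add_tuple (add_tuple pos direction) [1, 0] ∈ walls) then none
      else pvAStep walls direction boxes
        (if w = 2 then
          [add_tuple pos direction, add_tuple (add_tuple pos direction) [-1, 0], add_tuple (add_tuple pos direction) [1, 0]]
         else [add_tuple pos direction, add_tuple (add_tuple pos direction) [-1, 0]]) [] := by
  rw [to_move.eq_def]
  by_cases hw : add_tuple pos direction ∈ walls ∨ (w = 2 ∧ add_tuple (add_tuple pos direction) [1, 0] ∈ walls)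
  · simp only [if_pos hw]
  · simp only [if_neg hw]
    by_cases hw2 : w = 2
    · rw [if_pos hw2]
      simp only [pvAStep]
      by_cases h1 : add_tuple pos direction ∈ boxes
      · simp only [dif_pos h1, if_pos h1]
        cases hrec1 : to_move (add_tuple pos direction) (boxes.erase (add_tuple pos direction)) walls direction 2 with
        | none => simp
        | some mv1 =>
          simp only [List.nil_append]
          by_cases h2 : add_tuple (add_tuple pos direction) [-1, 0] ∈ boxes
          · simp only [dif_pos h2, if_pos h2]
            cases hrec2 : to_move (add_tuple (add_tuple pos direction) [-1, 0]) (boxes.erase (add_tuple (add_tuple pos direction) [-1, 0])) walls direction 2 with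
            | none => simp
            | some mv2 =>
              simp only []
              by_cases h3 : add_tuple (add_tuple pos direction) [1, 0] ∈ boxes
              · have hc3 : w = 2 ∧ add_tuple (add_tuple pos direction) [1, 0] ∈ boxes := ⟨hw2, h3⟩
                simp only [dif_pos hc3, if_pos h3]
              · have hc3 : ¬(w = 2 ∧ add_tuple (add_tuple pos direction) [1, 0] ∈ boxes) := fun hc => h3 hc.2
                simp only [dif_neg hc3, if_neg h3]
          · simp only [dif_neg h2, if_neg h2]
            by_cases h3 : add_tuple (add_tuple pos direction) [1, 0] ∈ boxes
            · have hc3 : w = 2 ∧ add_tuple (add_tuple pos direction) [1, 0] ∈ boxes := ⟨hw2, h3⟩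
              simp only [dif_pos hc3, if_pos h3]
            · have hc3 : ¬(w = 2 ∧ add_tuple (add_tuple pos direction) [1, 0] ∈ boxes) := fun hc => h3 hc.2
              simp only [dif_neg hc3, if_neg h3]
      · simp only [dif_neg h1, if_neg h1]
        by_cases h2 : add_tuple (add_tuple pos direction) [-1, 0] ∈ boxes
        · simp only [dif_pos h2, if_pos h2]
          cases hrec2 : to_move (add_tuple (add_tuple pos direction) [-1, 0]) (boxes.erase (add_tuple (add_tuple pos direction) [-1, 0])) walls direction 2 with
          | none => simp
          | some mv2 =>
            simp only [List.nil_append]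
            by_cases h3 : add_tuple (add_tuple pos direction) [1, 0] ∈ boxes
            · have hc3 : w = 2 ∧ add_tuple (add_tuple pos direction) [1, 0] ∈ boxes := ⟨hw2, h3⟩
              simp only [dif_pos hc3, if_pos h3]
            · have hc3 : ¬(w = 2 ∧ add_tuple (add_tuple pos direction) [1, 0] ∈ boxes) := fun hc => h3 hc.2
              simp only [dif_neg hc3, if_neg h3]
        · simp only [dif_neg h2, if_neg h2]
          by_cases h3 : add_tuple (add_tuple pos direction) [1, 0] ∈ boxes
          · have hc3 : w = 2 ∧ add_tuple (add_tuple pos direction) [1, 0] ∈ boxes := ⟨hw2, h3⟩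
            simp only [dif_pos hc3, if_pos h3]
          · have hc3 : ¬(w = 2 ∧ add_tuple (add_tuple pos direction) [1, 0] ∈ boxes) := fun hc => h3 hc.2
            simp only [dif_neg hc3, if_neg h3]
    · simp only [if_neg hw2]
      simp only [pvAStep]
      have hc3 : ∀ acc2 : List (List Int),
          (if h3 : w = 2 ∧ add_tuple (add_tuple pos direction) [1, 0] ∈ boxes then
            match to_move (add_tuple (add_tuple pos direction) [1, 0]) (boxes.erase (add_tuple (add_tuple pos direction) [1, 0])) walls direction 2 with
            | none => none
            | some move => some (acc2 ++ add_tuple (add_tuple pos direction) [1, 0] :: move)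
          else some acc2) = some acc2 := fun acc2 => dif_neg (fun hc => hw2 hc.1)
      by_cases h1 : add_tuple pos direction ∈ boxes
      · simp only [dif_pos h1, if_pos h1]
        cases hrec1 : to_move (add_tuple pos direction) (boxes.erase (add_tuple pos direction)) walls direction 2 with
        | none => simp
        | some mv1 =>
          simp only [List.nil_append]
          by_cases h2 : add_tuple (add_tuple pos direction) [-1, 0] ∈ boxes
          · simp only [dif_pos h2, if_pos h2]
            cases hrec2 : to_move (add_tuple (add_tuple pos direction) [-1, 0]) (boxes.erase (add_tuple (add_tuple pos direction) [-1, 0])) walls direction 2 with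
            | none => simp
            | some mv2 => simp only [hc3]
          · simp only [dif_neg h2, if_neg h2, hc3]
      · simp only [dif_neg h1, if_neg h1]
        by_cases h2 : add_tuple (add_tuple pos direction) [-1, 0] ∈ boxes
        · simp only [dif_pos h2, if_pos h2]
          cases hrec2 : to_move (add_tuple (add_tuple pos direction) [-1, 0]) (boxes.erase (add_tuple (add_tuple pos direction) [-1, 0])) walls direction 2 with
          | none => simp
          | some mv2 => simp only [hc3, List.nil_append]
        · simp only [dif_neg h2, if_neg h2, hc3]

-- the accumulator of pvAStep is a pure prefix
theorem pvAStep_acc (walls : List (List Int)) (direction : List Int) (boxes : List (List Int)) :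
    ∀ (cands acc : List (List Int)),
      pvAStep walls direction boxes cands acc = (pvAStep walls direction boxes cands []).map (acc ++ ·) := by
  intro cands
  induction cands with
  | nil => intro acc; simp [pvAStep]
  | cons q rest ih =>
    intro acc
    simp only [pvAStep]
    by_cases hq : q ∈ boxes
    · simp only [if_pos hq]
      cases h : to_move q (boxes.erase q) walls direction 2 with
      | none => simp
      | some mv =>
          dsimp only
          rw [ih (acc ++ q :: mv), ih (([] : List (List Int)) ++ q :: mv)]
          cases pvAStep walls direction boxes rest [] with
          | none => rfl
          | some r => simp
    · simp only [if_neg hq]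
      exact ih acc

-- to_move at recursion width 2, with the trivial `2 = 2` tests resolved
theorem to_move_as_step2 (pos : List Int) (boxes walls : List (List Int)) (direction : List Int) :
    to_move pos boxes walls direction 2 =
      if add_tuple pos direction ∈ walls ∨ add_tuple (add_tuple pos direction) [1, 0] ∈ walls then none
      else pvAStep walls direction boxes
        [add_tuple pos direction, add_tuple (add_tuple pos direction) [-1, 0], add_tuple (add_tuple pos direction) [1, 0]] [] := by
  rw [to_move_as_step pos boxes walls direction 2]
  simp

-- proof-side recursive mirror of the machine: process one frame's candidate
-- list, returning the collected output and the restored live set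
def tmR (walls : List (List Int)) (direction : List Int) (fuel : Nat) (cands : List (List Int)) (live : List (List Int)) (out : List (List Int)) : Option (List (List Int) × List (List Int)) :=
  match cands with
  | [] => some (out, live)
  | q :: qs =>
    if q ∈ live then
      let x := PySem.List.pyGetD q 0 0 + PySem.List.pyGetD direction 0 0
      let y := PySem.List.pyGetD q 1 0 + PySem.List.pyGetD direction 1 0
      if [x, y] ∈ walls ∨ [x + 1, y] ∈ walls then none
      else
        match fuel with
        | 0 => none
        | f + 1 =>
          match tmR walls direction f [[x, y], [x - 1, y], [x + 1, y]] (PySem.Set.discard live q) (out ++ [q]) with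
          | none => none
          | some (out1, live1) => tmR walls direction (f + 1) qs (PySem.Set.add live1 q) out1
    else tmR walls direction fuel qs live out
termination_by (fuel, cands.length)
decreasing_by
  · exact Prod.Lex.left _ _ (Nat.lt_succ_self f)
  · exact Prod.Lex.right _ (Nat.lt_succ_self qs.length)
  · exact Prod.Lex.right _ (Nat.lt_succ_self qs.length)

-- tmR never grows the live set
theorem tmR_len (walls : List (List Int)) (direction : List Int) :
    ∀ (fuel : Nat) (cands live out out1 live1 : List (List Int)),
      tmR walls direction fuel cands live out = some (out1, live1) → live1.length ≤ live.length := by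
  intro fuel
  induction fuel with
  | zero =>
    intro cands
    induction cands with
    | nil =>
      intro live out out1 live1 h
      rw [tmR] at h
      cases h
      exact le_rfl
    | cons q qs ih =>
      intro live out out1 live1 h
      rw [tmR] at h
      by_cases hq : q ∈ live
      · simp only [if_pos hq] at h
        split at h
        · exact absurd h (by simp)
        · exact absurd h (by simp)
      · simp only [if_neg hq] at h
        exact ih live out out1 live1 h
  | succ f ihf =>
    intro cands
    induction cands with
    | nil =>
      intro live out out1 live1 h
      rw [tmR] at h
      cases h
      exact le_rfl
    | cons q qs ih =>
      intro live out out1 live1 h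
      rw [tmR] at h
      by_cases hq : q ∈ live
      · simp only [if_pos hq] at h
        split at h
        · exact absurd h (by simp)
        · rename_i hnw
          cases hinner : tmR walls direction f
              [[PySem.List.pyGetD q 0 0 + PySem.List.pyGetD direction 0 0, PySem.List.pyGetD q 1 0 + PySem.List.pyGetD direction 1 0],
               [PySem.List.pyGetD q 0 0 + PySem.List.pyGetD direction 0 0 - 1, PySem.List.pyGetD q 1 0 + PySem.List.pyGetD direction 1 0],
               [PySem.List.pyGetD q 0 0 + PySem.List.pyGetD direction 0 0 + 1, PySem.List.pyGetD q 1 0 + PySem.List.pyGetD direction 1 0]]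
              (PySem.Set.discard live q) (out ++ [q]) with
          | none => rw [hinner] at h; exact absurd h (by simp)
          | some p =>
            obtain ⟨o1, l1⟩ := p
            rw [hinner] at h
            have h1 : l1.length ≤ (PySem.Set.discard live q).length := ihf _ _ _ _ _ hinner
            have h2 : live1.length ≤ (PySem.Set.add l1 q).length := ih _ _ _ _ h
            have h3 := pvAddLenLe l1 q
            have h4 := pvDiscardLenLt hq
            omega
      · simp only [if_neg hq] at h
        exact ih live out out1 live1 h

-- the machine run of one frame plus a tail stack is tmR on the frame followed
-- by the machine on the tail (with the frame's restore applied)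
theorem tmB_machine_frame (walls : List (List Int)) (direction : List Int) :
    ∀ (fuel : Nat) (cands live out : List (List Int)) (rb : Option (List Int)) (rest : List (List (List Int) × Option (List Int))),
      live.length < fuel →
      tmB_machine walls direction ((cands, rb) :: rest) live out =
        match tmR walls direction fuel cands live out with
        | none => none
        | some (out1, live1) =>
            tmB_machine walls direction rest
              (match rb with | none => live1 | some b => PySem.Set.add live1 b) out1 := by
  intro fuel
  induction fuel with
  | zero => intro _ live _ _ _ hf; omega
  | succ f ihf =>
    intro cands
    induction cands with
    | nil =>
      intro live out rb rest _
      rw [tmB_machine.eq_def, tmR]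
    | cons q qs ih =>
      intro live out rb rest hf
      rw [tmB_machine.eq_def, tmR]
      dsimp only
      by_cases hq : q ∈ live
      · simp only [dif_pos hq, if_pos hq]
        split
        · rfl
        · rename_i hnw
          have hd := pvDiscardLenLt hq
          rw [ihf _ _ _ (some q) _ (by omega)]
          cases hinner : tmR walls direction f
              [[PySem.List.pyGetD q 0 0 + PySem.List.pyGetD direction 0 0, PySem.List.pyGetD q 1 0 + PySem.List.pyGetD direction 1 0],
               [PySem.List.pyGetD q 0 0 + PySem.List.pyGetD direction 0 0 - 1, PySem.List.pyGetD q 1 0 + PySem.List.pyGetD direction 1 0],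
               [PySem.List.pyGetD q 0 0 + PySem.List.pyGetD direction 0 0 + 1, PySem.List.pyGetD q 1 0 + PySem.List.pyGetD direction 1 0]]
              (PySem.Set.discard live q) (out ++ [q]) with
          | none => simp
          | some p =>
            obtain ⟨o1, l1⟩ := p
            simp only
            have hl1 : l1.length ≤ (PySem.Set.discard live q).length := tmR_len walls direction _ _ _ _ _ _ hinner
            have hadd := pvAddLenLe l1 q
            rw [ih (PySem.Set.add l1 q) o1 rb rest (by omega)]
      · simp only [dif_neg hq, if_neg hq]
        exact ih live out rb rest hf

-- tmR on a live set that is a permutation of A's (duplicate-free) box set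
-- computes exactly A's branch-chain fold, and restores live up to permutation
theorem tmR_eq_pvAStep (walls : List (List Int)) (direction : List Int) :
    ∀ (fuel : Nat) (boxes : List (List Int)), boxes.Nodup → boxes.length < fuel →
      ∀ (cands live out : List (List Int)), live.Perm boxes →
        ((tmR walls direction fuel cands live out).map Prod.fst = pvAStep walls direction boxes cands out) ∧
        (∀ out1 live1, tmR walls direction fuel cands live out = some (out1, live1) → live1.Perm live) := by
  intro fuel
  induction fuel with
  | zero => intro boxes _ hf; omega
  | succ f ihf =>
    intro boxes hnd hf cands
    induction cands with
    | nil =>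
      intro live out hperm
      constructor
      · rw [tmR]; rfl
      · intro out1 live1 h
        rw [tmR] at h
        cases h
        exact List.Perm.refl _
    | cons q qs ih =>
      intro live out hperm
      have hndl : live.Nodup := hperm.nodup_iff.mpr hnd
      rw [tmR]
      simp only [pvAStep]
      by_cases hq : q ∈ live
      · have hqb : q ∈ boxes := hperm.mem_iff.mp hq
        simp only [if_pos hq, if_pos hqb]
        -- bridge tmR's cell coordinates to A's add_tuple forms
        have e1 : ([PySem.List.pyGetD q 0 0 + PySem.List.pyGetD direction 0 0,
                    PySem.List.pyGetD q 1 0 + PySem.List.pyGetD direction 1 0] : List Int)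
            = add_tuple q direction := rfl
        have e2 : ([PySem.List.pyGetD q 0 0 + PySem.List.pyGetD direction 0 0 - 1,
                    PySem.List.pyGetD q 1 0 + PySem.List.pyGetD direction 1 0] : List Int)
            = add_tuple (add_tuple q direction) [-1, 0] := by
          simp [add_tuple, pvGet1, sub_eq_add_neg]
        have e3 : ([PySem.List.pyGetD q 0 0 + PySem.List.pyGetD direction 0 0 + 1,
                    PySem.List.pyGetD q 1 0 + PySem.List.pyGetD direction 1 0] : List Int)
            = add_tuple (add_tuple q direction) [1, 0] := by
          simp [add_tuple, pvGet1]
        rw [to_move_as_step2 q (boxes.erase q) walls direction]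
        simp only [e1, e2, e3]
        split
        · rename_i hw
          refine ⟨by simp, ?_⟩
          intro _ _ h
          exact absurd h (by simp)
        · rename_i hw
          -- inner call: live minus q is a permutation of boxes.erase q
          have hperm' : (PySem.Set.discard live q).Perm (boxes.erase q) := by
            rw [pvDiscardEqErase live hndl q]
            exact hperm.erase q
          have hnd' : (boxes.erase q).Nodup := hnd.erase q
          have hlen' : (boxes.erase q).length < f := by
            have h1 := List.length_erase_add_one hqb
            omega
          obtain ⟨ihA, ihP⟩ := ihf (boxes.erase q) hnd' hlen'
            [add_tuple q direction, add_tuple (add_tuple q direction) [-1, 0], add_tuple (add_tuple q direction) [1, 0]]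
            (PySem.Set.discard live q) (out ++ [q]) hperm'
          rw [pvAStep_acc walls direction (boxes.erase q) _ (out ++ [q])] at ihA
          cases hinner : tmR walls direction f
              [add_tuple q direction, add_tuple (add_tuple q direction) [-1, 0], add_tuple (add_tuple q direction) [1, 0]]
              (PySem.Set.discard live q) (out ++ [q]) with
          | none =>
            rw [hinner] at ihA
            cases hz : pvAStep walls direction (boxes.erase q)
                [add_tuple q direction, add_tuple (add_tuple q direction) [-1, 0], add_tuple (add_tuple q direction) [1, 0]] [] with
            | none =>
              refine ⟨by simp, ?_⟩
              intro out1 live1 h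
              exact absurd h (by simp)
            | some mv => rw [hz] at ihA; simp at ihA
          | some p =>
            obtain ⟨o1, l1⟩ := p
            rw [hinner] at ihA
            cases hz : pvAStep walls direction (boxes.erase q)
                [add_tuple q direction, add_tuple (add_tuple q direction) [-1, 0], add_tuple (add_tuple q direction) [1, 0]] [] with
            | none => rw [hz] at ihA; simp at ihA
            | some mv =>
              rw [hz] at ihA
              simp only [Option.map_some] at ihA
              have ho1 : o1 = out ++ q :: mv := by
                have := congrArg (Option.getD · []) ihA
                simpa using this
              have hl1 : l1.Perm (PySem.Set.discard live q) := ihP o1 l1 hinner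
              -- re-adding q restores a permutation of live
              have hqnot : q ∉ l1 := fun hmem => by
                have : q ∈ PySem.Set.discard live q := hl1.mem_iff.mp hmem
                simp [PySem.Set.discard] at this
              have haddeq : PySem.Set.add l1 q = l1 ++ [q] := by
                simp only [PySem.Set.add]
                rw [if_neg (by simpa using hqnot)]
              have hl1' : l1.Perm (live.erase q) := by
                rw [pvDiscardEqErase live hndl q] at hl1; exact hl1
              have hrestore : (PySem.Set.add l1 q).Perm live := by
                rw [haddeq]
                exact (List.perm_append_singleton q l1).trans
                  ((hl1'.cons q).trans (List.perm_cons_erase hq).symm)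
              obtain ⟨ihA2, ihP2⟩ := ih (PySem.Set.add l1 q) o1 (hrestore.trans hperm)
              refine ⟨?_, ?_⟩
              · dsimp only
                rw [ihA2, ho1]
              · intro out1 live1 h
                dsimp only at h
                exact (ihP2 out1 live1 h).trans hrestore
      · have hqb : q ∉ boxes := fun h => hq (hperm.mem_iff.mpr h)
        simp only [if_neg hq, if_neg hqb]
        exact ih live out hperm

-- ===== VERDICT (by name: the statement is the Claim_ definition above) =====
theorem to_move_spec : Claim_equal_to_move := by
  unfold Claim_equal_to_move
  intro pos boxes walls direction width _ hpre
  unfold Spec_to_move to_move_alt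
  have hofl : (PySem.Set.ofList boxes).Perm boxes := by
    have := (List.perm_ext_iff_of_nodup (PySem.Set.nodup_ofList boxes) hpre.2.2).mpr
      (fun a => PySem.Set.mem_ofList boxes a)
    exact this
  have hlen : (PySem.Set.ofList boxes).length < boxes.length + 1 := by
    have := hofl.length_eq; omega
  have e1 : ([PySem.List.pyGetD pos 0 0 + PySem.List.pyGetD direction 0 0,
              PySem.List.pyGetD pos 1 0 + PySem.List.pyGetD direction 1 0] : List Int)
      = add_tuple pos direction := rfl
  have e2 : ([PySem.List.pyGetD pos 0 0 + PySem.List.pyGetD direction 0 0 - 1,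
              PySem.List.pyGetD pos 1 0 + PySem.List.pyGetD direction 1 0] : List Int)
      = add_tuple (add_tuple pos direction) [-1, 0] := by
    simp [add_tuple, pvGet1, sub_eq_add_neg]
  have e3 : ([PySem.List.pyGetD pos 0 0 + PySem.List.pyGetD direction 0 0 + 1,
              PySem.List.pyGetD pos 1 0 + PySem.List.pyGetD direction 1 0] : List Int)
      = add_tuple (add_tuple pos direction) [1, 0] := by
    simp [add_tuple, pvGet1]
  rw [to_move_as_step pos boxes walls direction width]
  simp only [e1, e2, e3]
  split
  · rfl
  · rename_i hw
    rw [tmB_machine_frame walls direction (boxes.length + 1) _ _ _ none [] hlen]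
    obtain ⟨ihA, _⟩ := tmR_eq_pvAStep walls direction (boxes.length + 1) boxes hpre.2.2 (by omega)
      (if width = 2 then
        [add_tuple pos direction, add_tuple (add_tuple pos direction) [-1, 0], add_tuple (add_tuple pos direction) [1, 0]]
       else [add_tuple pos direction, add_tuple (add_tuple pos direction) [-1, 0]])
      (PySem.Set.ofList boxes) [] hofl
    cases hR : tmR walls direction (boxes.length + 1)
        (if width = 2 then
          [add_tuple pos direction, add_tuple (add_tuple pos direction) [-1, 0], add_tuple (add_tuple pos direction) [1, 0]]
         else [add_tuple pos direction, add_tuple (add_tuple pos direction) [-1, 0]])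
        (PySem.Set.ofList boxes) [] with
    | none =>
      rw [hR] at ihA
      simp only [Option.map_none] at ihA
      rw [← ihA]
    | some p =>
      obtain ⟨o1, l1⟩ := p
      rw [hR] at ihA
      simp only [Option.map_some] at ihA
      rw [← ihA]
      dsimp only
      rw [tmB_machine.eq_def]
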